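-- pv_equiv track=rewrite | github.com/pekkaklarck/rf5survey | process.py | combine_issues
-- ===== SOURCE A (Python) =====
-- PRIORITY_1 = 5
--
-- PRIORITY_2 = 3
--
-- PRIORITY_3 = 1
--
-- def combine_issues(prio1_issues, prio2_issues, prio3_issues):
--     issues = {}
--     for issues_by_prio, prio_weight in [(prio1_issues, PRIORITY_1),
--                                         (prio2_issues, PRIORITY_2),
--                                         (prio3_issues, PRIORITY_3)]:
--         for issue, count in issues_by_prio.items():
--             issues.setdefault(issue, 0)
--             issues[issue] += count * prio_weight
--     return issues
-- ===== SOURCE B (Python) =====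
-- PRIORITY_1 = 5
--
-- PRIORITY_2 = 3
--
-- PRIORITY_3 = 1
--
-- def combine_issues(prio1_issues, prio2_issues, prio3_issues):
--     keys = dict.fromkeys(list(prio1_issues) + list(prio2_issues) + list(prio3_issues))
--     return {key: prio1_issues.get(key, 0) * PRIORITY_1
--                  + prio2_issues.get(key, 0) * PRIORITY_2
--                  + prio3_issues.get(key, 0) * PRIORITY_3
--             for key in keys}
-- ===== Notes on version B (the rewrite author's own statement) =====
-- stated objective: alternative
-- what changed: Instead of folding every (dict, weight) entry into an accumulator dict with setdefault/+=, B first forms the first-seen-ordered union of keys via dict.fromkeys and builds the result in one dict comprehension with three .get(key,0) lookups per key.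
import Mathlib
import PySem

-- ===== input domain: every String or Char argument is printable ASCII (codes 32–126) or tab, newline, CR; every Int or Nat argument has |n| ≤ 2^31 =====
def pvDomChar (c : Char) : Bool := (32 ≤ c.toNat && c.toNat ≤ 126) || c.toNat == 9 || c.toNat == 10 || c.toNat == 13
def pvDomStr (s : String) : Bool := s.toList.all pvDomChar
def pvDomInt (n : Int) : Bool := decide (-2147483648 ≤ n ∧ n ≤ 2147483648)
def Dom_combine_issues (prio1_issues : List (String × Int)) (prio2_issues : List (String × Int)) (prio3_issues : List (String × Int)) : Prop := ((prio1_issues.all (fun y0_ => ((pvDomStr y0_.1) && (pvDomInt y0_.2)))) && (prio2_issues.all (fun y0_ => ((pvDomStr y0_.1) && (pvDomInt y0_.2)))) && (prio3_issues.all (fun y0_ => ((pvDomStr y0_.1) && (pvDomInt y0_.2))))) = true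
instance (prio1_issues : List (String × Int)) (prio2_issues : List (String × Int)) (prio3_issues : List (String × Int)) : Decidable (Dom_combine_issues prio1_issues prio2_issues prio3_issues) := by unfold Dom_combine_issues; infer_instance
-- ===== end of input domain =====

-- B replaces A's accumulate-into-a-dict loop over (dict, weight) pairs by one pass over the
-- ordered union of keys with three lookups per key (objective: alternative decomposition).


-- ===== PORT A =====
-- PRIORITY_1 = 5, PRIORITY_2 = 3, PRIORITY_3 = 1
def PRIORITY_1 : Int := 5
def PRIORITY_2 : Int := 3
def PRIORITY_3 : Int := 1

-- literal port of A: fold over [(prio1,5),(prio2,3),(prio3,1)]; inner loop over .items()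
-- does issues.setdefault(issue, 0); issues[issue] += count * prio_weight
def combine_issues (prio1_issues : List (String × Int)) (prio2_issues : List (String × Int)) (prio3_issues : List (String × Int)) : List (String × Int) :=
  let issues : PySem.Dict String Int :=
    [(prio1_issues, PRIORITY_1), (prio2_issues, PRIORITY_2), (prio3_issues, PRIORITY_3)].foldl
      (fun issues pr =>
        pr.1.foldl
          (fun issues it =>
            let issues := issues.setdefault it.1 0
            issues.modify it.1 0 (fun v => v + it.2 * pr.2))
          issues)
      PySem.Dict.empty
  issues.items

-- ===== PORT B =====
-- literal port of B: union of keys via dict.fromkeys (= PySem.List.dedup), then one map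
-- with three dict lookups .get(key, 0) per key
def combine_issues_alt (prio1_issues : List (String × Int)) (prio2_issues : List (String × Int)) (prio3_issues : List (String × Int)) : List (String × Int) :=
  let keys := PySem.List.dedup (prio1_issues.map Prod.fst ++ prio2_issues.map Prod.fst ++ prio3_issues.map Prod.fst)
  keys.map (fun key =>
    (key, (PySem.Dict.mk prio1_issues).getD key 0 * PRIORITY_1
          + (PySem.Dict.mk prio2_issues).getD key 0 * PRIORITY_2
          + (PySem.Dict.mk prio3_issues).getD key 0 * PRIORITY_3))

-- ===== PRECONDITION & SPEC =====
-- Pre_ only states that each association list represents a Python dict, i.e. its keys are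
-- distinct — in the Python program the three arguments ARE dicts, which cannot carry
-- duplicate keys, so this excludes no Python input.
def Pre_combine_issues (prio1_issues : List (String × Int)) (prio2_issues : List (String × Int)) (prio3_issues : List (String × Int)) : Prop :=
  (prio1_issues.map Prod.fst).Nodup ∧ (prio2_issues.map Prod.fst).Nodup ∧ (prio3_issues.map Prod.fst).Nodup
instance (prio1_issues : List (String × Int)) (prio2_issues : List (String × Int)) (prio3_issues : List (String × Int)) : Decidable (Pre_combine_issues prio1_issues prio2_issues prio3_issues) := by unfold Pre_combine_issues; infer_instance

def pvWitness_combine_issues : (List (String × Int)) × (List (String × Int)) × (List (String × Int)) :=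
  ([("crash", 2), ("doc", 1)], [("doc", 4)], [("ui", 3), ("crash", 1)])

def Spec_combine_issues (prio1_issues : List (String × Int)) (prio2_issues : List (String × Int)) (prio3_issues : List (String × Int)) (out : List (String × Int)) : Prop := out = combine_issues_alt prio1_issues prio2_issues prio3_issues
instance (prio1_issues : List (String × Int)) (prio2_issues : List (String × Int)) (prio3_issues : List (String × Int)) (out : List (String × Int)) : Decidable (Spec_combine_issues prio1_issues prio2_issues prio3_issues out) := by unfold Spec_combine_issues; infer_instance

-- ===== CLAIM (what is proved, stated in full; the proofs are below) =====
def Claim_equal_combine_issues : Prop := ∀ (prio1_issues : List (String × Int)) (prio2_issues : List (String × Int)) (prio3_issues : List (String × Int)), Dom_combine_issues prio1_issues prio2_issues prio3_issues → Pre_combine_issues prio1_issues prio2_issues prio3_issues → Spec_combine_issues prio1_issues prio2_issues prio3_issues (combine_issues prio1_issues prio2_issues prio3_issues)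

-- ===== LEMMAS AND PROOFS =====

-- a key absent from an association list looks up to the default
theorem getD_mk_of_not_mem (l : List (String × Int)) (k : String) (h : k ∉ l.map Prod.fst) :
    (PySem.Dict.mk l).getD k 0 = 0 := by
  apply PySem.Dict.getD_of_not_contains
  simp [PySem.Dict.contains_mk]
  intro a b hab; exact fun e => h (e ▸ List.mem_map_of_mem hab)

theorem setdefault_modify (d : PySem.Dict String Int) (k : String) (f : Int → Int) :
    (d.setdefault k 0).modify k 0 f = d.modify k 0 f := by
  cases h : d.contains k
  · rw [PySem.Dict.setdefault_of_not_contains d 0 h]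
    show (d.insert k 0).insert k (f ((d.insert k 0).getD k 0)) = d.insert k (f (d.getD k 0))
    rw [PySem.Dict.getD_insert_self, PySem.Dict.insert_insert_self,
        PySem.Dict.getD_of_not_contains d 0 h]
  · rw [PySem.Dict.setdefault_of_contains d 0 h]

theorem fold_getD (l : List (String × Int)) (w : Int) (d : PySem.Dict String Int) (k : String)
    (hl : (l.map Prod.fst).Nodup) :
    (l.foldl (fun d p => d.modify p.1 0 (fun v => v + p.2 * w)) d).getD k 0
      = d.getD k 0 + (PySem.Dict.mk l).getD k 0 * w := by
  induction l generalizing d with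
  | nil => rw [getD_mk_of_not_mem [] k (by simp)]; simp
  | cons p rest ih =>
    obtain ⟨hp, hrest⟩ := by simpa using hl
    rw [List.foldl_cons, ih _ hrest, PySem.Dict.getD_modify,
        PySem.Dict.getD_eq_get?_getD (PySem.Dict.mk (p :: rest)), PySem.Dict.get?_mk_cons]
    by_cases hk : k = p.1
    · subst hk
      rw [getD_mk_of_not_mem rest p.1 (by simp; exact fun x => hp x)]
      simp
    · have : (p.1 == k) = false := by simpa using fun e => hk e.symm
      simp [hk, this, ← PySem.Dict.getD_eq_get?_getD]


-- ===== VERDICT (by name: the statement is the Claim_ definition above) =====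
theorem combine_issues_spec : Claim_equal_combine_issues := by
  intro p1 p2 p3 _ hpre
  obtain ⟨h1, h2, h3⟩ := hpre
  unfold Spec_combine_issues combine_issues combine_issues_alt PRIORITY_1 PRIORITY_2 PRIORITY_3
  simp only [List.foldl_cons, List.foldl_nil, setdefault_modify]
  have hnd : (p3.foldl (fun d p => d.modify p.1 0 (fun v => v + p.2 * 1))
      (p2.foldl (fun d p => d.modify p.1 0 (fun v => v + p.2 * 3))
        (p1.foldl (fun d p => d.modify p.1 0 (fun v => v + p.2 * 5)) PySem.Dict.empty))).keys.Nodup := by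
    apply PySem.Dict.nodup_keys_foldl_modify_key
    apply PySem.Dict.nodup_keys_foldl_modify_key
    apply PySem.Dict.nodup_keys_foldl_modify_key
    simp [PySem.Dict.keys_empty]
  rw [PySem.Dict.items_eq_map_keys _ hnd 0,
      PySem.Dict.keys_foldl_modify_key, PySem.Dict.keys_foldl_modify_key,
      PySem.Dict.keys_foldl_modify_key, PySem.Dict.keys_empty, PySem.List.dedup_eq_ofList]
  have hk : PySem.Set.update (PySem.Set.update (PySem.Set.update ([] : PySem.Set String)
        (p1.map Prod.fst)) (p2.map Prod.fst)) (p3.map Prod.fst)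
      = PySem.Set.ofList (p1.map Prod.fst ++ p2.map Prod.fst ++ p3.map Prod.fst) := by
    rw [PySem.Set.ofList_eq_foldl, List.foldl_append, List.foldl_append]
    rfl
  rw [hk]
  apply List.map_congr_left
  intro k _
  rw [fold_getD _ _ _ _ h3, fold_getD _ _ _ _ h2, fold_getD _ _ _ _ h1, PySem.Dict.getD_empty]
  ring_nf
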